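-- pv_equiv track=rewrite | github.com/amjadpbi/Retail_BI | generate_all_facts_v3.py | get_supplier
-- ===== SOURCE A (Python) =====
-- SC_SUPPLIER_MAP = [
--     (range(1,   51),  12),   # Cloth Wholesale
--     (range(51,  151), 13),   # Galaxy Garments
--     (range(151, 229), 14),   # Diamond Shoes
-- ]
--
-- GR_SUPPLIER_RANGES = [
--     (range(229, 253),  4),   # Tea — Tapal (premium)
--     (range(253, 277),  5),   # Cooking Oil — Dalda (premium)
--     (range(277, 304),  3),   # Rice & Pulses
--     (range(304, 316),  8),   # Spices
--     (range(316, 326),  9),   # Jams & Spreads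
--     (range(326, 356), 10),   # Confectionery
--     (range(356, 388),  6),   # Beverages — PepsiCo (premium)
--     (range(388, 396), 11),   # Formula Milk
--     (range(396, 413),  1),   # Pampers & Kids
--     (range(413, 427),  2),   # Laundry & Cleaning
--     (range(427, 456),  7),   # Personal Care
-- ]
--
-- def get_supplier(row):
--     pk, bu = row['ProductKey'], row['BusinessUnitKey']
--     if bu == 1:
--         for r, s in SC_SUPPLIER_MAP:
--             if pk in r: return s
--         return 14
--     for r, s in GR_SUPPLIER_RANGES:
--         if pk in r: return s
--     return 3
-- ===== SOURCE B (Python) =====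
-- # B: breakpoint rank indexing — the contiguous range tables become sorted breakpoints + a value
-- # table; the supplier is the value at the rank of pk (number of breakpoints <= pk), no range scan.
-- _SC_BOUNDS = [1, 51, 151, 229]
-- _SC_SUP    = [14, 12, 13, 14, 14]
-- _GR_BOUNDS = [229, 253, 277, 304, 316, 326, 356, 388, 396, 413, 427, 456]
-- _GR_SUP    = [3, 4, 5, 3, 8, 9, 10, 6, 11, 1, 2, 7, 3]
--
-- def _pick(pk, bounds, sup):
--     return sup[sum(b <= pk for b in bounds)]
--
-- def get_supplier(row):
--     pk, bu = row['ProductKey'], row['BusinessUnitKey']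
--     if bu == 1:
--         return _pick(pk, _SC_BOUNDS, _SC_SUP)
--     return _pick(pk, _GR_BOUNDS, _GR_SUP)
-- ===== Notes on version B (the rewrite author's own statement) =====
-- stated objective: alternative
-- what changed: Replaces A's first-match scan over (range, supplier) pairs by a breakpoint representation: the supplier is read from a value table at the rank of pk (the count of sorted breakpoints <= pk), exploiting that each table's ranges are contiguous.
import Mathlib
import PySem

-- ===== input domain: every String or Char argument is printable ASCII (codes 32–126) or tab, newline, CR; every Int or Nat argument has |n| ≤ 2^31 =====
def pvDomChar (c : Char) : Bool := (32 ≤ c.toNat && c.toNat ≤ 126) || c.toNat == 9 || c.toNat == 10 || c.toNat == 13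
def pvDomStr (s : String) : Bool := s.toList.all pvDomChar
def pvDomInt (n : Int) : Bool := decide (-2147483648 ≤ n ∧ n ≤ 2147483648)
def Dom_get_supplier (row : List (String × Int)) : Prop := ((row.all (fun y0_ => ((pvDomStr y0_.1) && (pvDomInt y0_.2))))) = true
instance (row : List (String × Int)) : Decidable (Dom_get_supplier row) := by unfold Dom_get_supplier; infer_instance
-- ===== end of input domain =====

-- ===== PORT A =====
-- B replaces A's first-match scan over range tables by breakpoint-rank indexing into a value table; objective: alternative.
-- A's module tables: ranges represented as the lists of their elements (pyRange, step 1)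
def SC_SUPPLIER_MAP : List (List Int × Int) :=
  [(PySem.List.pyRange 1 51 1, 12), (PySem.List.pyRange 51 151 1, 13), (PySem.List.pyRange 151 229 1, 14)]

def GR_SUPPLIER_RANGES : List (List Int × Int) :=
  [(PySem.List.pyRange 229 253 1, 4), (PySem.List.pyRange 253 277 1, 5), (PySem.List.pyRange 277 304 1, 3),
   (PySem.List.pyRange 304 316 1, 8), (PySem.List.pyRange 316 326 1, 9), (PySem.List.pyRange 326 356 1, 10),
   (PySem.List.pyRange 356 388 1, 6), (PySem.List.pyRange 388 396 1, 11), (PySem.List.pyRange 396 413 1, 1),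
   (PySem.List.pyRange 413 427 1, 2), (PySem.List.pyRange 427 456 1, 7)]

-- A's `for r, s in table: if pk in r: return s` / `return dflt`
def scanRanges (pk : Int) : List (List Int × Int) → Int → Int
  | [], dflt => dflt
  | (r, s) :: rest, dflt => if pk ∈ r then s else scanRanges pk rest dflt

def get_supplier (row : List (String × Int)) : Int :=
  match (PySem.Dict.mk row).get? "ProductKey", (PySem.Dict.mk row).get? "BusinessUnitKey" with
  | some pk, some bu =>
      if bu == 1 then scanRanges pk SC_SUPPLIER_MAP 14
      else scanRanges pk GR_SUPPLIER_RANGES 3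
  | _, _ => 0  -- unreachable under Pre_ (Python raises KeyError)

-- ===== PORT B =====
-- Source B's breakpoint / value tables
def SC_BOUNDS : List Int := [1, 51, 151, 229]
def SC_SUP : List Int := [14, 12, 13, 14, 14]
def GR_BOUNDS : List Int := [229, 253, 277, 304, 316, 326, 356, 388, 396, 413, 427, 456]
def GR_SUP : List Int := [3, 4, 5, 3, 8, 9, 10, 6, 11, 1, 2, 7, 3]

-- `sum(b <= pk for b in bounds)`
def rankOf (pk : Int) (bounds : List Int) : Int :=
  bounds.foldl (fun acc b => acc + (if b ≤ pk then 1 else 0)) 0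

-- Source B's `_pick`: `sup[rank]`; the rank is always in range (0 ≤ rank ≤ len bounds < len sup),
-- so the `none` (IndexError) arm is unreachable
def pick (pk : Int) (bounds sup : List Int) : Int :=
  match PySem.List.pyGet? sup (rankOf pk bounds) with
  | some v => v
  | none => 0

def get_supplier_alt (row : List (String × Int)) : Int :=
  match (PySem.Dict.mk row).get? "ProductKey" with
  | none => 0  -- unreachable under Pre_ (Python raises KeyError)
  | some pk =>
    match (PySem.Dict.mk row).get? "BusinessUnitKey" with
    | none => 0  -- unreachable under Pre_ (Python raises KeyError)
    | some bu =>
      if bu == 1 then pick pk SC_BOUNDS SC_SUP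
      else pick pk GR_BOUNDS GR_SUP

-- ===== PRECONDITION & SPEC =====
-- Pre_: the dict must carry both keys; otherwise A (and B) raise KeyError.
def Pre_get_supplier (row : List (String × Int)) : Prop :=
  "ProductKey" ∈ row.map Prod.fst ∧ "BusinessUnitKey" ∈ row.map Prod.fst
instance (row : List (String × Int)) : Decidable (Pre_get_supplier row) := by
  unfold Pre_get_supplier; infer_instance

def pvWitness_get_supplier : (List (String × Int)) := [("ProductKey", 10), ("BusinessUnitKey", 1)]

def Spec_get_supplier (row : List (String × Int)) (out : Int) : Prop := out = get_supplier_alt row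
instance (row : List (String × Int)) (out : Int) : Decidable (Spec_get_supplier row out) := by unfold Spec_get_supplier; infer_instance

-- ===== CLAIM (what is proved, stated in full; the proofs are below) =====
def Claim_equal_get_supplier : Prop := ∀ (row : List (String × Int)), Dom_get_supplier row → Pre_get_supplier row → Spec_get_supplier row (get_supplier row)

-- ===== LEMMAS AND PROOFS =====

lemma sc_pick (pk : Int) : pick pk SC_BOUNDS SC_SUP = scanRanges pk SC_SUPPLIER_MAP 14 := by
  rcases lt_or_ge pk 1 with h0 | h0
  · simp [pick, rankOf, SC_BOUNDS, SC_SUP, SC_SUPPLIER_MAP, scanRanges, PySem.List.mem_pyRange_one, show ¬ (1:Int) ≤ pk by omega, show pk < (1:Int) by omega, show ¬ (51:Int) ≤ pk by omega, show pk < (51:Int) by omega, show ¬ (151:Int) ≤ pk by omega, show pk < (151:Int) by omega, show ¬ (229:Int) ≤ pk by omega, show pk < (229:Int) by omega]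
  rcases lt_or_ge pk 51 with h1 | h1
  · simp [pick, rankOf, SC_BOUNDS, SC_SUP, SC_SUPPLIER_MAP, scanRanges, PySem.List.mem_pyRange_one, show (1:Int) ≤ pk by omega, show ¬ pk < (1:Int) by omega, show ¬ (51:Int) ≤ pk by omega, show pk < (51:Int) by omega, show ¬ (151:Int) ≤ pk by omega, show pk < (151:Int) by omega, show ¬ (229:Int) ≤ pk by omega, show pk < (229:Int) by omega]
  rcases lt_or_ge pk 151 with h2 | h2
  · simp [pick, rankOf, SC_BOUNDS, SC_SUP, SC_SUPPLIER_MAP, scanRanges, PySem.List.mem_pyRange_one, show (1:Int) ≤ pk by omega, show ¬ pk < (1:Int) by omega, show (51:Int) ≤ pk by omega, show ¬ pk < (51:Int) by omega, show ¬ (151:Int) ≤ pk by omega, show pk < (151:Int) by omega, show ¬ (229:Int) ≤ pk by omega, show pk < (229:Int) by omega]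
  rcases lt_or_ge pk 229 with h3 | h3
  · simp [pick, rankOf, SC_BOUNDS, SC_SUP, SC_SUPPLIER_MAP, scanRanges, PySem.List.mem_pyRange_one, show (1:Int) ≤ pk by omega, show ¬ pk < (1:Int) by omega, show (51:Int) ≤ pk by omega, show ¬ pk < (51:Int) by omega, show (151:Int) ≤ pk by omega, show ¬ pk < (151:Int) by omega, show ¬ (229:Int) ≤ pk by omega, show pk < (229:Int) by omega]
  simp [pick, rankOf, SC_BOUNDS, SC_SUP, SC_SUPPLIER_MAP, scanRanges, PySem.List.mem_pyRange_one, show (1:Int) ≤ pk by omega, show ¬ pk < (1:Int) by omega, show (51:Int) ≤ pk by omega, show ¬ pk < (51:Int) by omega, show (151:Int) ≤ pk by omega, show ¬ pk < (151:Int) by omega, show (229:Int) ≤ pk by omega, show ¬ pk < (229:Int) by omega]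

lemma gr_pick (pk : Int) : pick pk GR_BOUNDS GR_SUP = scanRanges pk GR_SUPPLIER_RANGES 3 := by
  rcases lt_or_ge pk 229 with h0 | h0
  · simp [pick, rankOf, GR_BOUNDS, GR_SUP, GR_SUPPLIER_RANGES, scanRanges, PySem.List.mem_pyRange_one, show ¬ (229:Int) ≤ pk by omega, show pk < (229:Int) by omega, show ¬ (253:Int) ≤ pk by omega, show pk < (253:Int) by omega, show ¬ (277:Int) ≤ pk by omega, show pk < (277:Int) by omega, show ¬ (304:Int) ≤ pk by omega, show pk < (304:Int) by omega, show ¬ (316:Int) ≤ pk by omega, show pk < (316:Int) by omega, show ¬ (326:Int) ≤ pk by omega, show pk < (326:Int) by omega, show ¬ (356:Int) ≤ pk by omega, show pk < (356:Int) by omega, show ¬ (388:Int) ≤ pk by omega, show pk < (388:Int) by omega, show ¬ (396:Int) ≤ pk by omega, show pk < (396:Int) by omega, show ¬ (413:Int) ≤ pk by omega, show pk < (413:Int) by omega, show ¬ (427:Int) ≤ pk by omega, show pk < (427:Int) by omega, show ¬ (456:Int) ≤ pk by omega, show pk < (456:Int) by omega]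
  rcases lt_or_ge pk 253 with h1 | h1
  · simp [pick, rankOf, GR_BOUNDS, GR_SUP, GR_SUPPLIER_RANGES, scanRanges, PySem.List.mem_pyRange_one, show (229:Int) ≤ pk by omega, show ¬ pk < (229:Int) by omega, show ¬ (253:Int) ≤ pk by omega, show pk < (253:Int) by omega, show ¬ (277:Int) ≤ pk by omega, show pk < (277:Int) by omega, show ¬ (304:Int) ≤ pk by omega, show pk < (304:Int) by omega, show ¬ (316:Int) ≤ pk by omega, show pk < (316:Int) by omega, show ¬ (326:Int) ≤ pk by omega, show pk < (326:Int) by omega, show ¬ (356:Int) ≤ pk by omega, show pk < (356:Int) by omega, show ¬ (388:Int) ≤ pk by omega, show pk < (388:Int) by omega, show ¬ (396:Int) ≤ pk by omega, show pk < (396:Int) by omega, show ¬ (413:Int) ≤ pk by omega, show pk < (413:Int) by omega, show ¬ (427:Int) ≤ pk by omega, show pk < (427:Int) by omega, show ¬ (456:Int) ≤ pk by omega, show pk < (456:Int) by omega]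
  rcases lt_or_ge pk 277 with h2 | h2
  · simp [pick, rankOf, GR_BOUNDS, GR_SUP, GR_SUPPLIER_RANGES, scanRanges, PySem.List.mem_pyRange_one, show (229:Int) ≤ pk by omega, show ¬ pk < (229:Int) by omega, show (253:Int) ≤ pk by omega, show ¬ pk < (253:Int) by omega, show ¬ (277:Int) ≤ pk by omega, show pk < (277:Int) by omega, show ¬ (304:Int) ≤ pk by omega, show pk < (304:Int) by omega, show ¬ (316:Int) ≤ pk by omega, show pk < (316:Int) by omega, show ¬ (326:Int) ≤ pk by omega, show pk < (326:Int) by omega, show ¬ (356:Int) ≤ pk by omega, show pk < (356:Int) by omega, show ¬ (388:Int) ≤ pk by omega, show pk < (388:Int) by omega, show ¬ (396:Int) ≤ pk by omega, show pk < (396:Int) by omega, show ¬ (413:Int) ≤ pk by omega, show pk < (413:Int) by omega, show ¬ (427:Int) ≤ pk by omega, show pk < (427:Int) by omega, show ¬ (456:Int) ≤ pk by omega, show pk < (456:Int) by omega]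
  rcases lt_or_ge pk 304 with h3 | h3
  · simp [pick, rankOf, GR_BOUNDS, GR_SUP, GR_SUPPLIER_RANGES, scanRanges, PySem.List.mem_pyRange_one, show (229:Int) ≤ pk by omega, show ¬ pk < (229:Int) by omega, show (253:Int) ≤ pk by omega, show ¬ pk < (253:Int) by omega, show (277:Int) ≤ pk by omega, show ¬ pk < (277:Int) by omega, show ¬ (304:Int) ≤ pk by omega, show pk < (304:Int) by omega, show ¬ (316:Int) ≤ pk by omega, show pk < (316:Int) by omega, show ¬ (326:Int) ≤ pk by omega, show pk < (326:Int) by omega, show ¬ (356:Int) ≤ pk by omega, show pk < (356:Int) by omega, show ¬ (388:Int) ≤ pk by omega, show pk < (388:Int) by omega, show ¬ (396:Int) ≤ pk by omega, show pk < (396:Int) by omega, show ¬ (413:Int) ≤ pk by omega, show pk < (413:Int) by omega, show ¬ (427:Int) ≤ pk by omega, show pk < (427:Int) by omega, show ¬ (456:Int) ≤ pk by omega, show pk < (456:Int) by omega]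
  rcases lt_or_ge pk 316 with h4 | h4
  · simp [pick, rankOf, GR_BOUNDS, GR_SUP, GR_SUPPLIER_RANGES, scanRanges, PySem.List.mem_pyRange_one, show (229:Int) ≤ pk by omega, show ¬ pk < (229:Int) by omega, show (253:Int) ≤ pk by omega, show ¬ pk < (253:Int) by omega, show (277:Int) ≤ pk by omega, show ¬ pk < (277:Int) by omega, show (304:Int) ≤ pk by omega, show ¬ pk < (304:Int) by omega, show ¬ (316:Int) ≤ pk by omega, show pk < (316:Int) by omega, show ¬ (326:Int) ≤ pk by omega, show pk < (326:Int) by omega, show ¬ (356:Int) ≤ pk by omega, show pk < (356:Int) by omega, show ¬ (388:Int) ≤ pk by omega, show pk < (388:Int) by omega, show ¬ (396:Int) ≤ pk by omega, show pk < (396:Int) by omega, show ¬ (413:Int) ≤ pk by omega, show pk < (413:Int) by omega, show ¬ (427:Int) ≤ pk by omega, show pk < (427:Int) by omega, show ¬ (456:Int) ≤ pk by omega, show pk < (456:Int) by omega]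
  rcases lt_or_ge pk 326 with h5 | h5
  · simp [pick, rankOf, GR_BOUNDS, GR_SUP, GR_SUPPLIER_RANGES, scanRanges, PySem.List.mem_pyRange_one, show (229:Int) ≤ pk by omega, show ¬ pk < (229:Int) by omega, show (253:Int) ≤ pk by omega, show ¬ pk < (253:Int) by omega, show (277:Int) ≤ pk by omega, show ¬ pk < (277:Int) by omega, show (304:Int) ≤ pk by omega, show ¬ pk < (304:Int) by omega, show (316:Int) ≤ pk by omega, show ¬ pk < (316:Int) by omega, show ¬ (326:Int) ≤ pk by omega, show pk < (326:Int) by omega, show ¬ (356:Int) ≤ pk by omega, show pk < (356:Int) by omega, show ¬ (388:Int) ≤ pk by omega, show pk < (388:Int) by omega, show ¬ (396:Int) ≤ pk by omega, show pk < (396:Int) by omega, show ¬ (413:Int) ≤ pk by omega, show pk < (413:Int) by omega, show ¬ (427:Int) ≤ pk by omega, show pk < (427:Int) by omega, show ¬ (456:Int) ≤ pk by omega, show pk < (456:Int) by omega]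
  rcases lt_or_ge pk 356 with h6 | h6
  · simp [pick, rankOf, GR_BOUNDS, GR_SUP, GR_SUPPLIER_RANGES, scanRanges, PySem.List.mem_pyRange_one, show (229:Int) ≤ pk by omega, show ¬ pk < (229:Int) by omega, show (253:Int) ≤ pk by omega, show ¬ pk < (253:Int) by omega, show (277:Int) ≤ pk by omega, show ¬ pk < (277:Int) by omega, show (304:Int) ≤ pk by omega, show ¬ pk < (304:Int) by omega, show (316:Int) ≤ pk by omega, show ¬ pk < (316:Int) by omega, show (326:Int) ≤ pk by omega, show ¬ pk < (326:Int) by omega, show ¬ (356:Int) ≤ pk by omega, show pk < (356:Int) by omega, show ¬ (388:Int) ≤ pk by omega, show pk < (388:Int) by omega, show ¬ (396:Int) ≤ pk by omega, show pk < (396:Int) by omega, show ¬ (413:Int) ≤ pk by omega, show pk < (413:Int) by omega, show ¬ (427:Int) ≤ pk by omega, show pk < (427:Int) by omega, show ¬ (456:Int) ≤ pk by omega, show pk < (456:Int) by omega]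
  rcases lt_or_ge pk 388 with h7 | h7
  · simp [pick, rankOf, GR_BOUNDS, GR_SUP, GR_SUPPLIER_RANGES, scanRanges, PySem.List.mem_pyRange_one, show (229:Int) ≤ pk by omega, show ¬ pk < (229:Int) by omega, show (253:Int) ≤ pk by omega, show ¬ pk < (253:Int) by omega, show (277:Int) ≤ pk by omega, show ¬ pk < (277:Int) by omega, show (304:Int) ≤ pk by omega, show ¬ pk < (304:Int) by omega, show (316:Int) ≤ pk by omega, show ¬ pk < (316:Int) by omega, show (326:Int) ≤ pk by omega, show ¬ pk < (326:Int) by omega, show (356:Int) ≤ pk by omega, show ¬ pk < (356:Int) by omega, show ¬ (388:Int) ≤ pk by omega, show pk < (388:Int) by omega, show ¬ (396:Int) ≤ pk by omega, show pk < (396:Int) by omega, show ¬ (413:Int) ≤ pk by omega, show pk < (413:Int) by omega, show ¬ (427:Int) ≤ pk by omega, show pk < (427:Int) by omega, show ¬ (456:Int) ≤ pk by omega, show pk < (456:Int) by omega]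
  rcases lt_or_ge pk 396 with h8 | h8
  · simp [pick, rankOf, GR_BOUNDS, GR_SUP, GR_SUPPLIER_RANGES, scanRanges, PySem.List.mem_pyRange_one, show (229:Int) ≤ pk by omega, show ¬ pk < (229:Int) by omega, show (253:Int) ≤ pk by omega, show ¬ pk < (253:Int) by omega, show (277:Int) ≤ pk by omega, show ¬ pk < (277:Int) by omega, show (304:Int) ≤ pk by omega, show ¬ pk < (304:Int) by omega, show (316:Int) ≤ pk by omega, show ¬ pk < (316:Int) by omega, show (326:Int) ≤ pk by omega, show ¬ pk < (326:Int) by omega, show (356:Int) ≤ pk by omega, show ¬ pk < (356:Int) by omega, show (388:Int) ≤ pk by omega, show ¬ pk < (388:Int) by omega, show ¬ (396:Int) ≤ pk by omega, show pk < (396:Int) by omega, show ¬ (413:Int) ≤ pk by omega, show pk < (413:Int) by omega, show ¬ (427:Int) ≤ pk by omega, show pk < (427:Int) by omega, show ¬ (456:Int) ≤ pk by omega, show pk < (456:Int) by omega]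
  rcases lt_or_ge pk 413 with h9 | h9
  · simp [pick, rankOf, GR_BOUNDS, GR_SUP, GR_SUPPLIER_RANGES, scanRanges, PySem.List.mem_pyRange_one, show (229:Int) ≤ pk by omega, show ¬ pk < (229:Int) by omega, show (253:Int) ≤ pk by omega, show ¬ pk < (253:Int) by omega, show (277:Int) ≤ pk by omega, show ¬ pk < (277:Int) by omega, show (304:Int) ≤ pk by omega, show ¬ pk < (304:Int) by omega, show (316:Int) ≤ pk by omega, show ¬ pk < (316:Int) by omega, show (326:Int) ≤ pk by omega, show ¬ pk < (326:Int) by omega, show (356:Int) ≤ pk by omega, show ¬ pk < (356:Int) by omega, show (388:Int) ≤ pk by omega, show ¬ pk < (388:Int) by omega, show (396:Int) ≤ pk by omega, show ¬ pk < (396:Int) by omega, show ¬ (413:Int) ≤ pk by omega, show pk < (413:Int) by omega, show ¬ (427:Int) ≤ pk by omega, show pk < (427:Int) by omega, show ¬ (456:Int) ≤ pk by omega, show pk < (456:Int) by omega]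
  rcases lt_or_ge pk 427 with h10 | h10
  · simp [pick, rankOf, GR_BOUNDS, GR_SUP, GR_SUPPLIER_RANGES, scanRanges, PySem.List.mem_pyRange_one, show (229:Int) ≤ pk by omega, show ¬ pk < (229:Int) by omega, show (253:Int) ≤ pk by omega, show ¬ pk < (253:Int) by omega, show (277:Int) ≤ pk by omega, show ¬ pk < (277:Int) by omega, show (304:Int) ≤ pk by omega, show ¬ pk < (304:Int) by omega, show (316:Int) ≤ pk by omega, show ¬ pk < (316:Int) by omega, show (326:Int) ≤ pk by omega, show ¬ pk < (326:Int) by omega, show (356:Int) ≤ pk by omega, show ¬ pk < (356:Int) by omega, show (388:Int) ≤ pk by omega, show ¬ pk < (388:Int) by omega, show (396:Int) ≤ pk by omega, show ¬ pk < (396:Int) by omega, show (413:Int) ≤ pk by omega, show ¬ pk < (413:Int) by omega, show ¬ (427:Int) ≤ pk by omega, show pk < (427:Int) by omega, show ¬ (456:Int) ≤ pk by omega, show pk < (456:Int) by omega]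
  rcases lt_or_ge pk 456 with h11 | h11
  · simp [pick, rankOf, GR_BOUNDS, GR_SUP, GR_SUPPLIER_RANGES, scanRanges, PySem.List.mem_pyRange_one, show (229:Int) ≤ pk by omega, show ¬ pk < (229:Int) by omega, show (253:Int) ≤ pk by omega, show ¬ pk < (253:Int) by omega, show (277:Int) ≤ pk by omega, show ¬ pk < (277:Int) by omega, show (304:Int) ≤ pk by omega, show ¬ pk < (304:Int) by omega, show (316:Int) ≤ pk by omega, show ¬ pk < (316:Int) by omega, show (326:Int) ≤ pk by omega, show ¬ pk < (326:Int) by omega, show (356:Int) ≤ pk by omega, show ¬ pk < (356:Int) by omega, show (388:Int) ≤ pk by omega, show ¬ pk < (388:Int) by omega, show (396:Int) ≤ pk by omega, show ¬ pk < (396:Int) by omega, show (413:Int) ≤ pk by omega, show ¬ pk < (413:Int) by omega, show (427:Int) ≤ pk by omega, show ¬ pk < (427:Int) by omega, show ¬ (456:Int) ≤ pk by omega, show pk < (456:Int) by omega]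
  simp [pick, rankOf, GR_BOUNDS, GR_SUP, GR_SUPPLIER_RANGES, scanRanges, PySem.List.mem_pyRange_one, show (229:Int) ≤ pk by omega, show ¬ pk < (229:Int) by omega, show (253:Int) ≤ pk by omega, show ¬ pk < (253:Int) by omega, show (277:Int) ≤ pk by omega, show ¬ pk < (277:Int) by omega, show (304:Int) ≤ pk by omega, show ¬ pk < (304:Int) by omega, show (316:Int) ≤ pk by omega, show ¬ pk < (316:Int) by omega, show (326:Int) ≤ pk by omega, show ¬ pk < (326:Int) by omega, show (356:Int) ≤ pk by omega, show ¬ pk < (356:Int) by omega, show (388:Int) ≤ pk by omega, show ¬ pk < (388:Int) by omega, show (396:Int) ≤ pk by omega, show ¬ pk < (396:Int) by omega, show (413:Int) ≤ pk by omega, show ¬ pk < (413:Int) by omega, show (427:Int) ≤ pk by omega, show ¬ pk < (427:Int) by omega, show (456:Int) ≤ pk by omega, show ¬ pk < (456:Int) by omega]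

-- ===== VERDICT (by name: the statement is the Claim_ definition above) =====
theorem get_supplier_spec : Claim_equal_get_supplier := by
  intro row _ hpre
  unfold Spec_get_supplier get_supplier get_supplier_alt
  obtain ⟨h1, h2⟩ := hpre
  obtain ⟨⟨k1, v1⟩, hk1, hb1⟩ := List.exists_of_mem_map h1
  obtain ⟨⟨k2, v2⟩, hk2, hb2⟩ := List.exists_of_mem_map h2
  have e1 : ((PySem.Dict.mk row).get? "ProductKey").isSome := by
    rw [PySem.Dict.get?]
    simp only [Option.isSome_map, List.find?_isSome]
    exact ⟨(k1, v1), hk1, by simpa using hb1⟩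
  have e2 : ((PySem.Dict.mk row).get? "BusinessUnitKey").isSome := by
    rw [PySem.Dict.get?]
    simp only [Option.isSome_map, List.find?_isSome]
    exact ⟨(k2, v2), hk2, by simpa using hb2⟩
  obtain ⟨pk, hpk⟩ := Option.isSome_iff_exists.mp e1
  obtain ⟨bu, hbu⟩ := Option.isSome_iff_exists.mp e2
  rw [hpk, hbu]
  by_cases hb : bu == 1 <;> simp only [hb, if_true, if_false, sc_pick, gr_pick]
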